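-- pv_equiv track=rewrite | github.com/tsani/coding-cat-public | remove-vowels-once/mutation_2.py | remove_vowels_once
-- ===== SOURCE A (Python) =====
-- def remove_vowels_once(word: str) -> str:
--     '''
--     Missing lowercase vowels
--     '''
--     vowels = "AEIOUY"
--     seen_vowels = set()
--     result = []
--     for char in word:
--         if char in vowels:
--             if char not in seen_vowels:
--                 seen_vowels.add(char)
--             else:
--                 result.append(char)
--         else:
--             result.append(char)
--     return ''.join(result)
-- ===== SOURCE B (Python) =====
-- def remove_vowels_once(word: str) -> str:
--     to_remove = set()
--     for v in "AEIOUY":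
--         i = word.find(v)
--         if i >= 0:
--             to_remove.add(i)
--     return ''.join(c for i, c in enumerate(word) if i not in to_remove)
-- ===== Notes on version B (the rewrite author's own statement) =====
-- stated objective: alternative
-- what changed: Replaces the stateful scan with a seen-vowel set by first computing the set of first-occurrence indices via word.find for each vowel, then a positional filter over enumerate(word).
import Mathlib
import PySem

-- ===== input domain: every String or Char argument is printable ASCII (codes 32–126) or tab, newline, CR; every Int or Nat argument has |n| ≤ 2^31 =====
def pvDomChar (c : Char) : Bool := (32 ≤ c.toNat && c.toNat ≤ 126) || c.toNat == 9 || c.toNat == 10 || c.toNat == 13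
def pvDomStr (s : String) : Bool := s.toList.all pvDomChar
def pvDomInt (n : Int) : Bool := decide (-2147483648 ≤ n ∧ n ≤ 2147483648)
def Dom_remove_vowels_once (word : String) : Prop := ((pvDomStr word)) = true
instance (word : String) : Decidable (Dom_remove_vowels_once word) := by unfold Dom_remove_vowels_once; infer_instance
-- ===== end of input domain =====

-- B replaces A's single stateful scan (seen-vowel set) by an index table of first
-- occurrences built with word.find per vowel, then a positional filter over
-- enumerate(word); a genuinely different decomposition of the same task, same cost.

-- ===== PORT A =====
-- A's loop: fold over the characters carrying (seen_vowels, result).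
def remove_vowels_once (word : String) : String :=
  let vowels : List Char := "AEIOUY".toList
  let st := word.toList.foldl
    (fun (st : PySem.Set Char × List Char) char =>
      if vowels.contains char then
        if st.1.contains char = false then (st.1.add char, st.2)
        else (st.1, st.2 ++ [char])
      else (st.1, st.2 ++ [char]))
    ((PySem.Set.empty : PySem.Set Char), ([] : List Char))
  String.mk st.2

-- ===== PORT B =====
-- B's first pass: the set of indices to delete (word.find(v) for each vowel, if present).
def pvToRemove (l : List Char) : PySem.Set Int :=
  "AEIOUY".toList.foldl
    (fun (acc : PySem.Set Int) v =>
      let i := PySem.Chars.find l [v]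
      if 0 ≤ i then acc.add i else acc)
    (PySem.Set.empty : PySem.Set Int)

-- B's second pass: keep the characters whose index is not in the table.
def remove_vowels_once_alt (word : String) : String :=
  let toRemove := pvToRemove word.toList
  String.mk (((PySem.List.enumerate word.toList).filter
      (fun p => !(toRemove.contains p.1))).map (·.2))

-- ===== PRECONDITION & SPEC =====
def Spec_remove_vowels_once (word : String) (out : String) : Prop := out = remove_vowels_once_alt word
instance (word : String) (out : String) : Decidable (Spec_remove_vowels_once word out) := by unfold Spec_remove_vowels_once; infer_instance

-- ===== CLAIM (what is proved, stated in full; the proofs are below) =====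
def Claim_equal_remove_vowels_once : Prop := ∀ (word : String), Dom_remove_vowels_once word → Spec_remove_vowels_once word (remove_vowels_once word)

-- ===== LEMMAS AND PROOFS =====

-- the recursion A's fold performs on the result list
def pvScan (S : PySem.Set Char) : List Char → List Char
  | [] => []
  | c :: cs =>
    if ("AEIOUY".toList).contains c then
      if S.contains c = false then pvScan (S.add c) cs
      else c :: pvScan S cs
    else c :: pvScan S cs

lemma pvScanA (l : List Char) : ∀ (S : PySem.Set Char) (acc : List Char),
    (l.foldl
      (fun (st : PySem.Set Char × List Char) char =>
        if ("AEIOUY".toList).contains char then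
          if st.1.contains char = false then (st.1.add char, st.2)
          else (st.1, st.2 ++ [char])
        else (st.1, st.2 ++ [char]))
      (S, acc)).2 = acc ++ pvScan S l := by
  induction l with
  | nil => simp [pvScan]
  | cons c cs ih =>
    intro S acc
    simp only [List.foldl_cons, pvScan]
    split_ifs with h1 h2 <;> rw [ih] <;> simp

lemma pvMemToRemoveAux (l : List Char) (x : Int) (vs : List Char) :
    ∀ (acc : PySem.Set Int),
    (x ∈ vs.foldl (fun (acc : PySem.Set Int) v =>
      let i := PySem.Chars.find l [v]
      if 0 ≤ i then acc.add i else acc) acc) ↔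
      x ∈ acc ∨ ∃ v ∈ vs, PySem.Chars.find l [v] = x ∧ 0 ≤ x := by
  induction vs with
  | nil => simp
  | cons v vs ih =>
    intro acc
    simp only [List.foldl_cons, ih]
    split_ifs with h
    · rw [PySem.Set.mem_add]
      simp only [List.exists_mem_cons_iff]
      constructor
      · rintro ((hx | rfl) | ⟨w, hw, hf, hx⟩)
        · exact Or.inl hx
        · exact Or.inr (Or.inl ⟨rfl, h⟩)
        · exact Or.inr (Or.inr ⟨w, hw, hf, hx⟩)
      · rintro (hx | ⟨hf, hx⟩ | ⟨w, hw, hf, hx⟩)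
        · exact Or.inl (Or.inl hx)
        · exact Or.inl (Or.inr hf.symm)
        · exact Or.inr ⟨w, hw, hf, hx⟩
    · rw [List.exists_mem_cons_iff]
      have hne : ¬(PySem.Chars.find l [v] = x ∧ 0 ≤ x) := fun ⟨hf, hx⟩ => h (hf ▸ hx)
      tauto

lemma pvMemToRemove (l : List Char) (x : Int) :
    x ∈ pvToRemove l ↔ ∃ v ∈ "AEIOUY".toList, PySem.Chars.find l [v] = x ∧ 0 ≤ x := by
  unfold pvToRemove
  rw [pvMemToRemoveAux]
  simp [PySem.Set.empty]

lemma pvSingletonPrefix (t : List Char) (v : Char) : [v] <+: t ↔ t.head? = some v := by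
  constructor
  · rintro ⟨t', rfl⟩; rfl
  · intro h
    cases t with
    | nil => simp at h
    | cons a t => simp at h; exact ⟨t, by simp [h]⟩

lemma pvPrefixAt (l : List Char) (v : Char) (i : Nat) (hi : i < l.length) :
    [v] <+: l.drop i ↔ l[i] = v := by
  rw [pvSingletonPrefix, List.head?_drop, List.getElem?_eq_getElem hi, Option.some_inj]

lemma pvMemTake (l : List Char) (v : Char) (j : Nat) :
    v ∈ l.take j ↔ ∃ i, ∃ _ : i < l.length, i < j ∧ l[i] = v := by
  rw [List.mem_iff_getElem]
  constructor
  · rintro ⟨i, hlt, hv⟩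
    have h1 : i < l.length := lt_of_lt_of_le hlt (by simp [List.length_take])
    have h2 : i < j := lt_of_lt_of_le hlt (by simp [List.length_take])
    exact ⟨i, h1, h2, by rw [← List.getElem_take (h := hlt)]; exact hv⟩
  · rintro ⟨i, h1, h2, hv⟩
    have hlt : i < (l.take j).length := by simp [List.length_take]; omega
    exact ⟨i, hlt, by rw [List.getElem_take]; exact hv⟩

lemma pvFindSingleton (l : List Char) (v : Char) (j : Nat) (hj : j < l.length) :
    PySem.Chars.find l [v] = (j : Int) ↔ l[j] = v ∧ v ∉ l.take j := by
  constructor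
  · intro h
    have h0 : 0 ≤ PySem.Chars.find l [v] := by rw [h]; exact Int.natCast_nonneg j
    obtain ⟨hpre, hmin⟩ := PySem.Chars.find_spec h0
    rw [h, Int.toNat_natCast] at hpre hmin
    refine ⟨(pvPrefixAt l v j hj).1 hpre, ?_⟩
    intro hmem
    obtain ⟨i, h1, h2, hv⟩ := (pvMemTake l v j).1 hmem
    exact hmin i h2 ((pvPrefixAt l v i h1).2 hv)
  · rintro ⟨hv, hnt⟩
    have hmem : v ∈ l := hv ▸ l.getElem_mem hj
    have h0 : 0 ≤ PySem.Chars.find l [v] :=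
      (PySem.Chars.find_nonneg_iff l [v]).2 ((List.singleton_infix_iff v l).2 hmem)
    obtain ⟨hpre, hmin⟩ := PySem.Chars.find_spec h0
    set k := (PySem.Chars.find l [v]).toNat with hk
    have hklen : k < l.length := by
      by_cases hkl : k < l.length
      · exact hkl
      · rw [List.drop_eq_nil_of_le (le_of_not_gt hkl)] at hpre
        exact absurd (List.prefix_nil.1 hpre) (by simp)
    have hkv : l[k] = v := (pvPrefixAt l v k hklen).1 hpre
    have hkj : k = j := by
      rcases lt_trichotomy k j with hlt | heq | hgt
      · exact absurd ((pvMemTake l v j).2 ⟨k, hklen, hlt, hkv⟩) hnt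
      · exact heq
      · exact absurd ((pvPrefixAt l v j hj).2 hv) (hmin j hgt)
    rw [← Int.toNat_of_nonneg h0, ← hk, hkj]

lemma pvRemCond (full : List Char) (k : Nat) (hk : k < full.length) :
    ((pvToRemove full).contains ((k : Int)) = true) ↔
      (full[k] ∈ "AEIOUY".toList ∧ full[k] ∉ full.take k) := by
  rw [PySem.Set.contains_iff, pvMemToRemove]
  constructor
  · rintro ⟨v, hvV, hf, -⟩
    obtain ⟨h1, h2⟩ := (pvFindSingleton full v k hk).1 hf
    subst h1
    exact ⟨hvV, h2⟩
  · rintro ⟨h1, h2⟩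
    exact ⟨full[k], h1, (pvFindSingleton full full[k] k hk).2 ⟨rfl, h2⟩, Int.natCast_nonneg k⟩

-- the scan with seen-set S over the suffix full.drop k equals the index filter,
-- provided S holds exactly the vowels of the processed prefix full.take k
lemma pvMain (t : List Char) : ∀ (full : List Char) (k : Nat) (S : PySem.Set Char),
    full.drop k = t →
    (∀ c, c ∈ S ↔ c ∈ "AEIOUY".toList ∧ c ∈ full.take k) →
    ((PySem.List.enumerate t (k : Int)).filter
        (fun p => !((pvToRemove full).contains p.1))).map (·.2) = pvScan S t := by
  induction t with
  | nil => intro full k S _ _; simp [PySem.List.enumerate, pvScan]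
  | cons c cs ih =>
    intro full k S hdrop hS
    have hk : k < full.length := by
      by_contra h
      rw [List.drop_eq_nil_of_le (le_of_not_gt h)] at hdrop
      simp at hdrop
    have hck : full[k] = c := by
      have h := List.head?_drop (l := full) (i := k)
      rw [hdrop, List.getElem?_eq_getElem hk] at h
      simpa using h.symm
    have hdrop' : full.drop (k + 1) = cs := by
      have h : full.drop (k + 1) = (full.drop k).drop 1 := by rw [List.drop_drop]
      rw [h, hdrop]; rfl
    have htake : full.take (k + 1) = full.take k ++ [c] := by
      rw [List.take_add_one, List.getElem?_eq_getElem hk, hck]; rfl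
    have henum : PySem.List.enumerate (c :: cs) (k : Int)
        = ((k : Int), c) :: PySem.List.enumerate cs ((k : Int) + 1) := rfl
    have hk1 : ((k : Int) + 1) = (((k + 1 : Nat)) : Int) := by push_cast; ring
    have hcond := pvRemCond full k hk
    rw [hck] at hcond
    rw [henum, List.filter_cons, hk1]
    by_cases hv : c ∈ "AEIOUY".toList
    · by_cases hm : c ∈ full.take k
      · have hfalse : (pvToRemove full).contains ((k : Int)) = false := by
          rw [Bool.eq_false_iff]; intro h; exact ((hcond.1 h).2) hm
        have hSc : S.contains c = true := PySem.Set.contains_iff S c |>.2 ((hS c).2 ⟨hv, hm⟩)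
        rw [hfalse]
        simp only [Bool.not_false, if_true, List.map_cons]
        rw [pvScan]
        rw [if_pos (by simpa using hv), if_neg (by rw [hSc]; simp)]
        congr 1
        exact ih full (k + 1) S hdrop' (by
          intro c'
          rw [hS c', htake]
          simp only [List.mem_append, List.mem_singleton]
          constructor
          · rintro ⟨h1, h2⟩; exact ⟨h1, Or.inl h2⟩
          · rintro ⟨h1, h2 | rfl⟩
            · exact ⟨h1, h2⟩
            · exact ⟨h1, hm⟩)
      · have htrue : (pvToRemove full).contains ((k : Int)) = true := hcond.2 ⟨hv, hm⟩
        rw [htrue]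
        simp only [Bool.not_true, Bool.false_eq_true, if_false]
        rw [pvScan]
        rw [if_pos (by simpa using hv),
            if_pos (by rw [Bool.eq_false_iff]; intro h; exact hm ((hS c).1 ((PySem.Set.contains_iff S c).1 h)).2)]
        exact ih full (k + 1) (S.add c) hdrop' (by
          intro c'
          rw [PySem.Set.mem_add, hS c', htake]
          simp only [List.mem_append, List.mem_singleton]
          constructor
          · rintro (⟨h1, h2⟩ | rfl)
            · exact ⟨h1, Or.inl h2⟩
            · exact ⟨hv, Or.inr rfl⟩
          · rintro ⟨h1, h2 | rfl⟩
            · exact Or.inl ⟨h1, h2⟩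
            · exact Or.inr rfl)
    · have hfalse : (pvToRemove full).contains ((k : Int)) = false := by
        rw [Bool.eq_false_iff]; intro h; exact hv (hcond.1 h).1
      rw [hfalse]
      simp only [Bool.not_false, if_true, List.map_cons]
      rw [pvScan]
      rw [if_neg (by simpa using hv)]
      congr 1
      exact ih full (k + 1) S hdrop' (by
        intro c'
        rw [hS c', htake]
        simp only [List.mem_append, List.mem_singleton]
        constructor
        · rintro ⟨h1, h2⟩; exact ⟨h1, Or.inl h2⟩
        · rintro ⟨h1, h2 | rfl⟩
          · exact ⟨h1, h2⟩
          · exact absurd h1 hv)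

-- ===== VERDICT (by name: the statement is the Claim_ definition above) =====
theorem remove_vowels_once_spec : Claim_equal_remove_vowels_once := by
  intro word _
  unfold Spec_remove_vowels_once remove_vowels_once remove_vowels_once_alt
  simp only
  rw [pvScanA]
  have h := pvMain word.toList word.toList 0 PySem.Set.empty (by simp) (by simp [PySem.Set.empty])
  simp only [Nat.cast_zero] at h
  rw [← h]
  rfl
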